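-- pv_equiv track=rewrite | github.com/alancast/LeetCodeProblems | python/medium/259_three_sum_smaller.py | threeSumSmaller_binary_search
-- ===== SOURCE A (Python) =====
-- from typing import List
-- from bisect import bisect_left
--
-- def threeSumSmaller_binary_search(nums: List[int], target: int) -> int:
--     n = len(nums)
--     nums.sort()
--
--     # Fix all first 2 pairs and then find how many 3rd are left
--     answer = 0
--     for i in range(n-2):
--         num_i = nums[i]
--         for j in range(i+1, n-1):
--             num_j = nums[j]
--             pair_sum = num_i + num_j
--             max_left = target - pair_sum
--             right_idx = bisect_left(nums, max_left, j+1)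
--             answer += max(0, right_idx - (j+1))
--
--     return answer
-- ===== SOURCE B (Python) =====
-- from typing import List
--
-- def threeSumSmaller_binary_search(nums: List[int], target: int) -> int:
--     # Two-pointer sweep after sorting: O(n^2) instead of binary search per pair.
--     nums.sort()
--     n = len(nums)
--     answer = 0
--     for i in range(n - 2):
--         rem = target - nums[i]
--         lo = i + 1
--         hi = n - 1
--         while lo < hi:
--             if nums[lo] + nums[hi] < rem:
--                 answer += hi - lo
--                 lo += 1
--             else:
--                 hi -= 1
--     return answer
-- ===== Notes on version B (the rewrite author's own statement) =====
-- stated objective: faster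
-- what changed: Replaces the per-pair binary search (bisect_left for every (i,j) pair) with a two-pointer sweep per fixed i, counting hi-lo pairs at once, dropping the log factor.
import Mathlib
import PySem

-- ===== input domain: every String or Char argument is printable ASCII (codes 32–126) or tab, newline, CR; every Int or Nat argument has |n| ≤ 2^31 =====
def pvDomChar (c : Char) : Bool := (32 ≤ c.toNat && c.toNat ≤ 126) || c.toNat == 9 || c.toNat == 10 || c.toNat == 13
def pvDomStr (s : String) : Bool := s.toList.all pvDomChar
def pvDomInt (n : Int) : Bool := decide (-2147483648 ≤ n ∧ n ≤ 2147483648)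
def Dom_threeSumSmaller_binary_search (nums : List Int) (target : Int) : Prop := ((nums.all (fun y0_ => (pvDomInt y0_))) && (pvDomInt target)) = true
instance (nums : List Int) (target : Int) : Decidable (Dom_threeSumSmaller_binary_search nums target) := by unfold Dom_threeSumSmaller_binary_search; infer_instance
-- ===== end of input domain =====

-- B replaces A's per-pair binary search with a two-pointer sweep per fixed first index (O(n^2) vs
-- O(n^2 log n)); both Pythons sort nums in place (same mutation), the theorems are about the return value.

-- ===== PORT A =====
-- bisect_left(a, x, lo) is CPython's loop 'while lo < hi: mid = (lo+hi)//2; if a[mid] < x: lo = mid+1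
-- else: hi = mid' with hi = len(a): exactly PySem.List.bisectLeftLoop a x fuel lo len with enough fuel
-- (the PySem primitive bisectLeft is this loop with lo = 0). lo = j+1 here with j ≥ 0, so .toNat is exact.
def threeSumSmaller_binary_search (nums : List Int) (target : Int) : Int :=
  let n : Int := (nums.length : Int)
  let s := PySem.List.sorted nums (fun x => x) false   -- nums.sort() (in-place; return value ported)
  (PySem.List.pyRange 0 (n - 2) 1).foldl
    (fun answer i =>
      let num_i := PySem.List.pyGetD s i 0
      (PySem.List.pyRange (i + 1) (n - 1) 1).foldl
        (fun answer j =>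
          let num_j := PySem.List.pyGetD s j 0
          let pair_sum := num_i + num_j
          let max_left := target - pair_sum
          let right_idx : Nat := PySem.List.bisectLeftLoop s max_left s.length (j + 1).toNat s.length
          answer + max 0 ((right_idx : Int) - (j + 1)))
        answer)
    0

-- ===== PORT B =====
-- the 'while lo < hi' two-pointer loop of Source B
def pvTwoPtr (s : List Int) (rem : Int) (lo hi : Nat) (answer : Int) : Int :=
  if lo < hi then
    if PySem.List.pyGetD s (lo : Int) 0 + PySem.List.pyGetD s (hi : Int) 0 < rem then
      pvTwoPtr s rem (lo + 1) hi (answer + ((hi : Int) - (lo : Int)))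
    else
      pvTwoPtr s rem lo (hi - 1) answer
  else answer
termination_by hi - lo
decreasing_by all_goals omega

def threeSumSmaller_binary_search_alt (nums : List Int) (target : Int) : Int :=
  let s := PySem.List.sorted nums (fun x => x) false   -- nums.sort() (in-place; return value ported)
  let n : Int := (s.length : Int)
  (PySem.List.pyRange 0 (n - 2) 1).foldl
    (fun answer i =>
      pvTwoPtr s (target - PySem.List.pyGetD s i 0) (i.toNat + 1) (s.length - 1) answer)
    0

-- ===== PRECONDITION & SPEC =====
def Spec_threeSumSmaller_binary_search (nums : List Int) (target : Int) (out : Int) : Prop := out = threeSumSmaller_binary_search_alt nums target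
instance (nums : List Int) (target : Int) (out : Int) : Decidable (Spec_threeSumSmaller_binary_search nums target out) := by unfold Spec_threeSumSmaller_binary_search; infer_instance

-- ===== CLAIM (what is proved, stated in full; the proofs are below) =====
def Claim_equal_threeSumSmaller_binary_search : Prop := ∀ (nums : List Int) (target : Int), Dom_threeSumSmaller_binary_search nums target → Spec_threeSumSmaller_binary_search nums target (threeSumSmaller_binary_search nums target)

-- ===== LEMMAS AND PROOFS =====

/-- `s[k]` as both loops read it (indices are in range wherever these are used). -/
def pvV (s : List Int) (k : Nat) : Int := s.getD k 0

/-- number of `k ∈ [a, b)` with `s[k] < t`. -/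
def pvCnt (s : List Int) (t : Int) (a b : Nat) : Nat :=
  ((Finset.Ico a b).filter (fun k => pvV s k < t)).card

/-- number of pairs `l ≤ j < k ≤ r` with `s[j] + s[k] < rem`. -/
def pvQ (s : List Int) (rem : Int) (l r : Nat) : Nat :=
  ∑ j ∈ Finset.Ico l r, pvCnt s (rem - pvV s j) (j + 1) (r + 1)

def pvMono (s : List Int) : Prop := ∀ a b : Nat, a ≤ b → b < s.length → pvV s a ≤ pvV s b

lemma pvMono_sorted (xs : List Int) : pvMono (PySem.List.sorted xs (fun x => x) false) := by
  intro a b hab hb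
  unfold pvV
  rw [List.getD_eq_getElem _ _ (by omega), List.getD_eq_getElem _ _ hb]
  exact PySem.List.sorted_id_getElem_mono xs hab hb

lemma pvCnt_split (s : List Int) (t : Int) {a b c : Nat} (h1 : a ≤ b) (h2 : b ≤ c) :
    pvCnt s t a c = pvCnt s t a b + pvCnt s t b c := by
  unfold pvCnt
  rw [← Finset.Ico_union_Ico_eq_Ico h1 h2, Finset.filter_union,
    Finset.card_union_of_disjoint
      (Finset.disjoint_filter_filter (Finset.Ico_disjoint_Ico_consecutive a b c))]

lemma pvCnt_all (s : List Int) (t : Int) {a b : Nat}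
    (h : ∀ k, a ≤ k → k < b → pvV s k < t) : pvCnt s t a b = b - a := by
  unfold pvCnt
  rw [Finset.filter_true_of_mem (fun k hk => by
    rw [Finset.mem_Ico] at hk; exact h k hk.1 hk.2)]
  exact Nat.card_Ico a b

lemma pvCnt_none (s : List Int) (t : Int) {a b : Nat}
    (h : ∀ k, a ≤ k → k < b → ¬ pvV s k < t) : pvCnt s t a b = 0 := by
  unfold pvCnt
  rw [Finset.filter_false_of_mem (fun k hk => by
    rw [Finset.mem_Ico] at hk; exact h k hk.1 hk.2)]
  rfl

lemma pvCnt_succ_top (s : List Int) (t : Int) {a b : Nat} (h : ¬ pvV s b < t) :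
    pvCnt s t a (b + 1) = pvCnt s t a b := by
  by_cases hab : a ≤ b
  · unfold pvCnt
    rw [Nat.Ico_succ_right_eq_insert_Ico hab, Finset.filter_insert, if_neg h]
  · unfold pvCnt
    rw [Finset.Ico_eq_empty (by omega), Finset.Ico_eq_empty (by omega)]

/-- `s[m]?` at an in-range index. -/
lemma pvGetElem? (s : List Int) (m : Nat) (h : m < s.length) : s[m]? = some (pvV s m) := by
  rw [List.getElem?_eq_getElem h]
  unfold pvV
  rw [List.getD_eq_getElem _ _ h]

/-- one unfolding step of the bisect loop, through `pvV`. -/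
lemma pvBisectStep (s : List Int) (x : Int) (fuel lo hi : Nat) (h : (lo + hi) / 2 < s.length)
    (hlh : lo < hi) :
    PySem.List.bisectLeftLoop s x (fuel + 1) lo hi =
      if pvV s ((lo + hi) / 2) < x then PySem.List.bisectLeftLoop s x fuel ((lo + hi) / 2 + 1) hi
      else PySem.List.bisectLeftLoop s x fuel lo ((lo + hi) / 2) := by
  rw [PySem.List.bisectLeftLoop, if_pos hlh, pvGetElem? s _ h]

/-- CPython's bisect_left loop counts the elements `< x` in `[lo, hi)` of a sorted list. -/
lemma pvBisect (s : List Int) (x : Int) (hm : pvMono s) :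
    ∀ fuel lo hi, lo ≤ hi → hi ≤ s.length → hi - lo ≤ fuel →
      PySem.List.bisectLeftLoop s x fuel lo hi = lo + pvCnt s x lo hi := by
  intro fuel
  induction fuel with
  | zero =>
    intro lo hi h1 h2 h3
    have : lo = hi := by omega
    subst this
    simp [PySem.List.bisectLeftLoop, pvCnt]
  | succ fuel ih =>
    intro lo hi h1 h2 h3
    by_cases hlh : lo < hi
    · have hmid : (lo + hi) / 2 < s.length := by omega
      rw [pvBisectStep s x fuel lo hi hmid hlh]
      by_cases hy : pvV s ((lo + hi) / 2) < x
      · rw [if_pos hy, ih ((lo + hi) / 2 + 1) hi (by omega) h2 (by omega),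
          pvCnt_split s x (show lo ≤ (lo + hi) / 2 + 1 by omega)
            (show (lo + hi) / 2 + 1 ≤ hi by omega),
          pvCnt_all s x (a := lo) (b := (lo + hi) / 2 + 1)
            (fun k hk1 hk2 => lt_of_le_of_lt (hm k ((lo + hi) / 2) (by omega) hmid) hy)]
        omega
      · rw [if_neg hy, ih lo ((lo + hi) / 2) (by omega) (by omega) (by omega),
          pvCnt_split s x (show lo ≤ (lo + hi) / 2 by omega)
            (show (lo + hi) / 2 ≤ hi by omega),
          pvCnt_none s x (a := (lo + hi) / 2) (b := hi)
            (fun k hk1 hk2 hk3 => hy (lt_of_le_of_lt (hm ((lo + hi) / 2) k hk1 (by omega)) hk3))]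
        omega
    · rw [PySem.List.bisectLeftLoop, if_neg hlh]
      have : lo = hi := by omega
      subst this
      simp [pvCnt]

lemma pvQ_zero (s : List Int) (rem : Int) {lo hi : Nat} (h : ¬ lo < hi) :
    pvQ s rem lo hi = 0 := by
  unfold pvQ
  rw [Finset.Ico_eq_empty (by omega)]
  rfl

lemma pvQ_bot (s : List Int) (rem : Int) (hm : pvMono s) {lo hi : Nat}
    (hlo : lo < hi) (hhi : hi < s.length) (hlt : pvV s lo + pvV s hi < rem) :
    pvQ s rem lo hi = (hi - lo) + pvQ s rem (lo + 1) hi := by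
  unfold pvQ
  rw [Finset.sum_eq_sum_Ico_succ_bot hlo,
    pvCnt_all s (rem - pvV s lo) (a := lo + 1) (b := hi + 1)
      (fun k hk1 hk2 => by
        have := hm k hi (by omega) hhi
        omega)]
  omega

lemma pvQ_top (s : List Int) (rem : Int) (hm : pvMono s) {lo hi : Nat}
    (hlo : lo < hi) (hhi : hi < s.length) (hge : ¬ pvV s lo + pvV s hi < rem) :
    pvQ s rem lo hi = pvQ s rem lo (hi - 1) := by
  obtain ⟨r, rfl⟩ : ∃ r, hi = r + 1 := ⟨hi - 1, by omega⟩
  unfold pvQ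
  rw [Finset.sum_Ico_succ_top (by omega : lo ≤ r),
    pvCnt_none s (rem - pvV s r) (a := r + 1) (b := r + 1 + 1)
      (fun k hk1 hk2 => by
        have hk : k = r + 1 := by omega
        subst hk
        have := hm lo r (by omega) (by omega)
        omega)]
  simp only [Nat.add_sub_cancel, Nat.add_zero]
  exact Finset.sum_congr rfl (fun j hj => by
    rw [Finset.mem_Ico] at hj
    exact pvCnt_succ_top s (rem - pvV s j) (by
      have := hm lo j hj.1 (by omega)
      omega))

/-- the two-pointer loop computes the pair count. -/
lemma pvTwoPtr_eq (s : List Int) (rem : Int) (hm : pvMono s) :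
    ∀ d lo hi acc, hi - lo ≤ d → hi < s.length →
      pvTwoPtr s rem lo hi acc = acc + (pvQ s rem lo hi : Int) := by
  intro d
  induction d with
  | zero =>
    intro lo hi acc hd hhi
    rw [pvTwoPtr, if_neg (by omega), pvQ_zero s rem (by omega)]
    simp
  | succ d ih =>
    intro lo hi acc hd hhi
    by_cases hlh : lo < hi
    · have hvlo : PySem.List.pyGetD s (lo : Int) 0 = pvV s lo := by
        simp [pvV]
      have hvhi : PySem.List.pyGetD s (hi : Int) 0 = pvV s hi := by
        simp [pvV]
      rw [pvTwoPtr, if_pos hlh, hvlo, hvhi]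
      by_cases hcmp : pvV s lo + pvV s hi < rem
      · rw [if_pos hcmp, ih (lo + 1) hi _ (by omega) hhi,
          pvQ_bot s rem hm hlh hhi hcmp]
        push_cast [Nat.cast_sub (le_of_lt hlh)]
        ring
      · rw [if_neg hcmp, ih lo (hi - 1) _ (by omega) (by omega),
          pvQ_top s rem hm hlh hhi hcmp]
    · rw [pvTwoPtr, if_neg hlh, pvQ_zero s rem hlh]
      simp

/-- list-sum over `range` as a `Finset.range` sum. -/
lemma pvSumRange (g : Nat → Int) (m : Nat) :
    ((List.range m).map g).sum = ∑ k ∈ Finset.range m, g k := by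
  induction m with
  | zero => rfl
  | succ m ih => rw [List.range_succ, Finset.sum_range_succ, List.map_append, List.sum_append, ih]; simp

/-- A's inner loop (bisect per j) sums to the same pair count. -/
lemma pvInner (s : List Int) (target : Int) (hm : pvMono s) (i : Int) (acc : Int)
    (hi0 : 0 ≤ i) (hin : i < (s.length : Int) - 2) :
    (PySem.List.pyRange (i + 1) ((s.length : Int) - 1) 1).foldl
      (fun answer j =>
        answer + max 0
          (((PySem.List.bisectLeftLoop s (target - (PySem.List.pyGetD s i 0 + PySem.List.pyGetD s j 0)) s.length (j + 1).toNat s.length : Nat) : Int) - (j + 1)))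
      acc
    = acc + (pvQ s (target - PySem.List.pyGetD s i 0) (i.toNat + 1) (s.length - 1) : Int) := by
  have hlen3 : 3 ≤ s.length := by omega
  rw [PySem.List.foldl_add]
  congr 1
  rw [PySem.List.pyRange_one, List.map_map, pvSumRange]
  have hm' : ((s.length : Int) - 1 - (i + 1)).toNat = s.length - 1 - (i.toNat + 1) := by omega
  rw [hm']
  unfold pvQ
  rw [Finset.sum_Ico_eq_sum_range]
  rw [Nat.cast_sum]
  apply Finset.sum_congr rfl
  intro k hk
  rw [Finset.mem_range] at hk
  -- the j-index: Int side i + 1 + k, Nat side i.toNat + 1 + k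
  have hj : (i + 1 + (k : Int)) = ((i.toNat + 1 + k : Nat) : Int) := by omega
  simp only [Function.comp_apply]
  rw [hj]
  set jn : Nat := i.toNat + 1 + k with hjn
  have hjlt : jn < s.length - 1 := by omega
  have hnn : ((jn : Int) + 1).toNat = jn + 1 := by omega
  rw [hnn]
  rw [pvBisect s _ hm s.length (jn + 1) s.length (by omega) le_rfl (by omega)]
  have hvi : PySem.List.pyGetD s i 0 = pvV s i.toNat := by
    rw [show i = ((i.toNat : Nat) : Int) from (Int.toNat_of_nonneg hi0).symm,
      PySem.List.pyGetD_natCast]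
    simp [pvV, max_eq_left hi0]
  have hvj : PySem.List.pyGetD s ((jn : Nat) : Int) 0 = pvV s jn := by
    rw [PySem.List.pyGetD_natCast]
    rfl
  rw [hvi, hvj]
  have hth : target - (pvV s i.toNat + pvV s jn) = target - pvV s i.toNat - pvV s jn := by ring
  rw [hth]
  have hub : s.length - 1 + 1 = s.length := by omega
  rw [hub]
  have : max (0 : Int) (((jn + 1 + pvCnt s (target - pvV s i.toNat - pvV s jn) (jn + 1) s.length : Nat) : Int) - ((jn : Int) + 1))
      = (pvCnt s (target - pvV s i.toNat - pvV s jn) (jn + 1) s.length : Int) := by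
    push_cast
    omega
  rw [this]

-- ===== VERDICT (by name: the statement is the Claim_ definition above) =====
theorem threeSumSmaller_binary_search_spec : Claim_equal_threeSumSmaller_binary_search := by
  intro nums target _
  unfold Spec_threeSumSmaller_binary_search
  unfold threeSumSmaller_binary_search threeSumSmaller_binary_search_alt
  simp only []
  set s := PySem.List.sorted nums (fun x => x) false with hs
  have hlen : s.length = nums.length := PySem.List.length_sorted nums _ _
  have hm : pvMono s := pvMono_sorted nums
  rw [← hlen]
  apply PySem.List.foldl_congr_mem
  intro acc i hi
  rw [PySem.List.mem_pyRange_one] at hi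
  rw [pvInner s target hm i acc hi.1 hi.2,
    pvTwoPtr_eq s (target - PySem.List.pyGetD s i 0) hm (s.length - 1) (i.toNat + 1)
      (s.length - 1) acc (by omega) (by omega)]
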